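-- pv_equiv track=rewrite | github.com/azeez010/Bet-prediction-scraper | scraper.py | get_games_data
-- ===== SOURCE A (Python) =====
-- def get_games_data(games):
--     games_data = dict()
--     for index, game in enumerate(games):
--         if ":" in game:
--             get_game = games_data.get(game)
--             if get_game:
--                 get_game[0] += 1
--                 get_game.append(index)
--             else:
--                 games_data[game] = [1]
--                 games_data[game].append(index)
--
--     return games_data
-- ===== SOURCE B (Python) =====
-- def get_games_data(games):
--     # Distinct time-like games in first-occurrence order, then one scan per key
--     # collecting its positions; the count is the number of positions found.
--     order = list(dict.fromkeys(g for g in games if ":" in g))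
--     result = {}
--     for g in order:
--         idxs = [i for i, x in enumerate(games) if x == g]
--         result[g] = [len(idxs)] + idxs
--     return result
-- ===== Notes on version B (the rewrite author's own statement) =====
-- stated objective: alternative
-- what changed: Replaces the single-pass dict accumulation (inline count increment and index append per element) by a key-driven nested scan: first compute the distinct ':'-containing games in first-occurrence order, then for each such key rescan the whole list to collect its indices and derive the count from their number.
import Mathlib
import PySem

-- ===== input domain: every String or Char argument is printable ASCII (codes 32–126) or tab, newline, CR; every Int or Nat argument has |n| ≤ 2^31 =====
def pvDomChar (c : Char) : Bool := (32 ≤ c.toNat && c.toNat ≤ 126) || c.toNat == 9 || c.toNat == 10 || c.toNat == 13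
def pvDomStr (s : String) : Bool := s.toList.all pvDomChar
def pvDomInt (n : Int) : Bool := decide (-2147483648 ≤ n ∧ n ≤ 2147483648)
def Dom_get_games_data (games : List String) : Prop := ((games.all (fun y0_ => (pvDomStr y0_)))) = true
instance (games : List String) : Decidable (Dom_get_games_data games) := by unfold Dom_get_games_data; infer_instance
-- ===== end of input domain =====

-- B replaces A's single-pass dict accumulation by a key-driven nested scan:
-- distinct ':'-containing games first, then one rescan per key collecting its
-- indices, the count being their number (objective: alternative).

-- ===== PORT A =====
-- one loop step of A: ':' guard, then truthy get (a nonempty list) mutated in place, else fresh [1] plus append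
def pvStepA (d : PySem.Dict String (List Int)) (p : Int × String) : PySem.Dict String (List Int) :=
  if PySem.Str.isIn ":" p.2 then
    match d.get? p.2 with
    | some (a :: rest) => d.insert p.2 ((a + 1) :: (rest ++ [p.1]))   -- get_game[0] += 1; get_game.append(index)
    | _ => (d.insert p.2 [1]).insert p.2 ([1] ++ [p.1])               -- games_data[game] = [1]; games_data[game].append(index)
  else d

def get_games_data (games : List String) : List (String × List Int) :=
  ((PySem.List.enumerate games 0).foldl pvStepA PySem.Dict.empty).items

-- ===== PORT B =====
def get_games_data_alt (games : List String) : List (String × List Int) :=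
  -- order = list(dict.fromkeys(g for g in games if ":" in g))
  let order := PySem.List.dedup (games.filter (fun g => PySem.Str.isIn ":" g))
  -- for g in order: idxs = [i for i, x in enumerate(games) if x == g]; result[g] = [len(idxs)] + idxs
  (order.foldl (fun d g =>
      let idxs := ((PySem.List.enumerate games 0).filter (fun p => p.2 == g)).map (fun p => p.1)
      d.insert g ([(idxs.length : Int)] ++ idxs)) PySem.Dict.empty).items

-- ===== PRECONDITION & SPEC =====
def Spec_get_games_data (games : List String) (out : List (String × List Int)) : Prop := out = get_games_data_alt games
instance (games : List String) (out : List (String × List Int)) : Decidable (Spec_get_games_data games out) := by unfold Spec_get_games_data; infer_instance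

-- ===== CLAIM (what is proved, stated in full; the proofs are below) =====
def Claim_equal_get_games_data : Prop := ∀ (games : List String), Dom_get_games_data games → Spec_get_games_data games (get_games_data games)

-- ===== LEMMAS AND PROOFS =====

-- the indices of g in games, and the value A/B store under key g
def pvIdxs (games : List String) (g : String) : List Int :=
  ((PySem.List.enumerate games 0).filter (fun p => p.2 == g)).map (fun p => p.1)

def pvVal (games : List String) (g : String) : List Int :=
  ((pvIdxs games g).length : Int) :: pvIdxs games g

-- lookup in a dict whose items are keys mapped through a value function
theorem pv_get?_mk_mapF (l : List String) (f : String → List Int) (k : String) :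
    (PySem.Dict.mk (l.map (fun g => (g, f g)))).get? k
      = if k ∈ l then some (f k) else none := by
  induction l with
  | nil => simp [PySem.Dict.get?]
  | cons a t ih =>
      simp only [List.map_cons, PySem.Dict.get?_mk_cons, ih, List.mem_cons]
      by_cases h : a = k
      · simp [h]
      · have : (a == k) = false := beq_eq_false_iff_ne.mpr h
        simp [this, Ne.symm h]

theorem pv_mem_dedup_iff (games : List String) (x : String) :
    x ∈ PySem.List.dedup (games.filter (fun g => PySem.Str.isIn ":" g))
      ↔ x ∈ games ∧ PySem.Str.isIn ":" x = true := by
  rw [PySem.List.dedup_eq_ofList, PySem.Set.mem_ofList, List.mem_filter]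

theorem pv_add_of_mem {s : List String} {x : String} (h : x ∈ s) :
    PySem.Set.add s x = s := by
  simp [PySem.Set.add, h]

theorem pv_add_of_not_mem {s : List String} {x : String} (h : x ∉ s) :
    PySem.Set.add s x = s ++ [x] := by
  simp [PySem.Set.add, h]

theorem pv_dedup_append (games : List String) (x : String) :
    PySem.List.dedup ((games ++ [x]).filter (fun g => PySem.Str.isIn ":" g))
      = if PySem.Str.isIn ":" x then
          PySem.Set.add (PySem.List.dedup (games.filter (fun g => PySem.Str.isIn ":" g))) x
        else PySem.List.dedup (games.filter (fun g => PySem.Str.isIn ":" g)) := by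
  rw [List.filter_append, PySem.List.dedup_eq_ofList, PySem.List.dedup_eq_ofList]
  by_cases hx : PySem.Str.isIn ":" x
  · simp only [List.filter_cons, List.filter_nil, hx, if_true]
    rw [PySem.Set.ofList_append_singleton]
  · simp only [List.filter_cons, List.filter_nil, hx, Bool.false_eq_true, if_false, List.append_nil]

theorem pv_idxs_append (games : List String) (x g : String) :
    pvIdxs (games ++ [x]) g
      = pvIdxs games g ++ (if x == g then [(games.length : Int)] else []) := by
  unfold pvIdxs
  rw [PySem.List.enumerate_append, List.filter_append, List.map_append]
  congr 1
  by_cases h : x == g <;>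
    simp [PySem.List.enumerate_cons, PySem.List.enumerate_nil, h]

theorem pv_idxs_append_ne (games : List String) (x g : String) (h : x ≠ g) :
    pvIdxs (games ++ [x]) g = pvIdxs games g := by
  rw [pv_idxs_append]
  simp [beq_eq_false_iff_ne.mpr h]

theorem pv_idxs_nil_of_not_mem (games : List String) (x : String) (hx : x ∉ games) :
    pvIdxs games x = [] := by
  unfold pvIdxs
  rw [List.filter_eq_nil_iff.mpr, List.map_nil]
  intro p hp hbeq
  apply hx
  have : p.2 ∈ (PySem.List.enumerate games 0).map (fun p => p.2) := List.mem_map_of_mem hp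
  rw [PySem.List.map_snd_enumerate] at this
  exact (eq_of_beq hbeq) ▸ this

-- main invariant: A's dict items are the distinct ':'-keys mapped to their values
theorem pv_items_foldA (games : List String) :
    ((PySem.List.enumerate games 0).foldl pvStepA PySem.Dict.empty).items
      = (PySem.List.dedup (games.filter (fun g => PySem.Str.isIn ":" g))).map
          (fun g => (g, pvVal games g)) := by
  induction games using List.reverseRecOn with
  | nil => rfl
  | append_singleton games x ih =>
      rw [PySem.List.enumerate_append, List.foldl_append]
      rw [PySem.List.enumerate_cons, PySem.List.enumerate_nil]
      simp only [List.foldl_cons, List.foldl_nil]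
      set D := (PySem.List.enumerate games 0).foldl pvStepA PySem.Dict.empty with hD
      have hget : ∀ k, D.get? k
          = if k ∈ PySem.List.dedup (games.filter (fun g => PySem.Str.isIn ":" g))
            then some (pvVal games k) else none := by
        intro k
        have heta : D = PySem.Dict.mk D.items := rfl
        rw [heta, ih, pv_get?_mk_mapF]
      rw [pv_dedup_append]
      by_cases hx : PySem.Str.isIn ":" x
      · -- x is a ':' game
        simp only [hx, if_true]
        by_cases hmem : x ∈ PySem.List.dedup (games.filter (fun g => PySem.Str.isIn ":" g))
        · -- existing key: in-place update
          have hg : D.get? x = some (pvVal games x) := by rw [hget, if_pos hmem]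
          have hc : D.contains x = true := by
            rw [PySem.Dict.contains_eq_isSome_get?, hg]; rfl
          unfold pvStepA
          simp only [hx, if_true]
          rw [hg]
          simp only [pvVal]
          rw [PySem.Dict.items_insert_of_contains _ _ hc, ih, pv_add_of_mem hmem, List.map_map]
          apply List.map_congr_left
          intro g hg'
          by_cases hgx : g = x
          · subst hgx
            have hidx : pvIdxs (games ++ [g]) g = pvIdxs games g ++ [(games.length : Int)] := by
              rw [pv_idxs_append]; simp
            simp [Function.comp, hidx]
          · have hidx := pv_idxs_append_ne games x g (Ne.symm hgx)
            simp [Function.comp, pvVal, beq_eq_false_iff_ne.mpr hgx, hidx]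
        · -- new key: append at the end
          have hg : D.get? x = none := by rw [hget, if_neg hmem]
          have hc : D.contains x = false := by
            rw [PySem.Dict.contains_eq_isSome_get?, hg]; rfl
          have hxg : x ∉ games := fun hxin => hmem ((pv_mem_dedup_iff games x).mpr ⟨hxin, hx⟩)
          unfold pvStepA
          simp only [hx, if_true]
          rw [hg]
          rw [PySem.Dict.insert_insert_self]
          rw [PySem.Dict.items_insert_of_not_contains _ _ hc, ih, pv_add_of_not_mem hmem,
              List.map_append]
          congr 1
          · apply List.map_congr_left
            intro g hg'
            have hgx : x ≠ g := fun h => (h ▸ hmem) hg'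
            simp only [pvVal, pv_idxs_append_ne games x g hgx]
          · have hidx : pvIdxs (games ++ [x]) x = [(games.length : Int)] := by
              rw [pv_idxs_append, pv_idxs_nil_of_not_mem games x hxg]
              simp
            simp [pvVal, hidx]
      · -- not a ':' game: nothing changes
        simp only [hx, Bool.false_eq_true, if_false]
        unfold pvStepA
        simp only [hx, Bool.false_eq_true, if_false]
        rw [ih]
        apply List.map_congr_left
        intro g hg'
        have hgx : x ≠ g := by
          intro h
          apply hx
          rw [h]
          exact ((pv_mem_dedup_iff games g).mp hg').2
        simp only [pvVal, pv_idxs_append_ne games x g hgx]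

-- B's fold over fresh distinct keys is the same map
theorem pv_alt_eq_map (games : List String) :
    get_games_data_alt games
      = (PySem.List.dedup (games.filter (fun g => PySem.Str.isIn ":" g))).map
          (fun g => (g, pvVal games g)) := by
  unfold get_games_data_alt
  have h := PySem.Dict.items_foldl_insert_fresh
      (l := PySem.List.dedup (games.filter (fun g => PySem.Str.isIn ":" g)))
      (k := fun g => g)
      (v := fun g => pvVal games g)
      (d := (PySem.Dict.empty : PySem.Dict String (List Int)))
      (by intro a _; rfl)
      (by simpa using PySem.Set.nodup_ofList (games.filter (fun g => PySem.Str.isIn ":" g)))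
  simpa [pvVal, pvIdxs] using h

-- ===== VERDICT (by name: the statement is the Claim_ definition above) =====
theorem get_games_data_spec : Claim_equal_get_games_data := by
  intro games _
  unfold Spec_get_games_data get_games_data
  rw [pv_items_foldA, pv_alt_eq_map]
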